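-- pv_equiv track=rewrite | github.com/gali1998/ExtendedIntroToCSHomework | 1/idanvsme.py | idan_check_goldbach_for_num
-- ===== SOURCE A (Python) =====
-- def idan_check_goldbach_for_num(n, primes_lst):
--     primes_under_n = list(set(primes_lst) & set(range(n)))
--     for i in primes_under_n:
--         primes_under_i = list(set(primes_lst) & set(range(i + 1)))
--         for k in primes_under_i:
--             if i + k == n:
--                 return True
--     return False
-- ===== SOURCE B (Python) =====
-- def idan_check_goldbach_for_num(n, primes_lst):
--     candidates = sorted(set(p for p in primes_lst if 0 <= p < n))
--     left, right = 0, len(candidates) - 1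
--     while left <= right:
--         s = candidates[left] + candidates[right]
--         if s == n:
--             return True
--         if s < n:
--             left += 1
--         else:
--             right -= 1
--     return False
-- ===== Notes on version B (the rewrite author's own statement) =====
-- stated objective: faster
-- what changed: Replaces the nested scan over set intersections (which rebuilds set(range(i+1)) for every candidate) with one sorted distinct candidate list swept inward by two pointers.
import Mathlib
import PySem

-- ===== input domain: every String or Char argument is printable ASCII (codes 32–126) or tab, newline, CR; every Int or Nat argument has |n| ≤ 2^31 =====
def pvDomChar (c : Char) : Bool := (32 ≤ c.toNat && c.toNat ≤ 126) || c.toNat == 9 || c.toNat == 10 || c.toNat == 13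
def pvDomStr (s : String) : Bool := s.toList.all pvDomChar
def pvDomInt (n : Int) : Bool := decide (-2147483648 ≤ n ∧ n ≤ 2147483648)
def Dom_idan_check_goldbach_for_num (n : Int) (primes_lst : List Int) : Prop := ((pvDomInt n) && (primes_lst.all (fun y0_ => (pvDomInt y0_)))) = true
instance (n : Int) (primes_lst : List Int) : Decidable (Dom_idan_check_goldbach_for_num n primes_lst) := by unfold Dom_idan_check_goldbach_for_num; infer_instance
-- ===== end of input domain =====

-- B replaces A's nested scan over repeatedly rebuilt set intersections by a single
-- two-pointer sweep over the sorted distinct candidates (objective: faster).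

-- ===== PORT A =====
-- The for-loops over 'list(set & set)' are ported with PySem.Set.inter and List.any:
-- the Boolean result does not depend on Python's set iteration order.
def idan_check_goldbach_for_num (n : Int) (primes_lst : List Int) : Bool :=
  let primes_under_n := PySem.Set.inter (PySem.Set.ofList primes_lst) (PySem.List.pyRange 0 n 1)
  primes_under_n.any (fun i =>
    let primes_under_i := PySem.Set.inter (PySem.Set.ofList primes_lst) (PySem.List.pyRange 0 (i + 1) 1)
    primes_under_i.any (fun k => i + k == n))

-- ===== PORT B =====
-- the while-loop of Source B; candidates[left]/candidates[right] are only read while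
-- 0 ≤ left ≤ right < len, so pyGetD's default is never used on the loop's own reads
def pvTwoPtr (c : List Int) (n : Int) (l r : Int) : Bool :=
  if hlr : l ≤ r then
    let s := PySem.List.pyGetD c l 0 + PySem.List.pyGetD c r 0
    if s = n then true
    else if s < n then pvTwoPtr c n (l + 1) r
    else pvTwoPtr c n l (r - 1)
  else false
termination_by (r - l + 1).toNat
decreasing_by all_goals omega

def idan_check_goldbach_for_num_alt (n : Int) (primes_lst : List Int) : Bool :=
  let candidates := PySem.List.sorted (PySem.Set.ofList (primes_lst.filter (fun p => decide (0 ≤ p ∧ p < n)))) (fun x => x) false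
  pvTwoPtr candidates n 0 ((candidates.length : Int) - 1)

-- ===== PRECONDITION & SPEC =====
def Spec_idan_check_goldbach_for_num (n : Int) (primes_lst : List Int) (out : Bool) : Prop := out = idan_check_goldbach_for_num_alt n primes_lst
instance (n : Int) (primes_lst : List Int) (out : Bool) : Decidable (Spec_idan_check_goldbach_for_num n primes_lst out) := by unfold Spec_idan_check_goldbach_for_num; infer_instance

-- ===== CLAIM (what is proved, stated in full; the proofs are below) =====
def Claim_equal_idan_check_goldbach_for_num : Prop := ∀ (n : Int) (primes_lst : List Int), Dom_idan_check_goldbach_for_num n primes_lst → Spec_idan_check_goldbach_for_num n primes_lst (idan_check_goldbach_for_num n primes_lst)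

-- ===== LEMMAS AND PROOFS =====

-- A = true  iff  two members of the list with 0 ≤ q ≤ p < n sum to n
theorem portA_iff (n : Int) (lst : List Int) :
    idan_check_goldbach_for_num n lst = true ↔
      ∃ p ∈ lst, ∃ q ∈ lst, 0 ≤ p ∧ p < n ∧ 0 ≤ q ∧ q ≤ p ∧ p + q = n := by
  simp only [idan_check_goldbach_for_num, List.any_eq_true, PySem.Set.mem_inter,
    PySem.Set.mem_ofList, PySem.List.mem_pyRange_one, beq_iff_eq]
  constructor
  · rintro ⟨p, ⟨⟨hp, hp0, hpn⟩, q, ⟨hq, hq0, hqp⟩, hsum⟩⟩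
    exact ⟨p, hp, q, hq, hp0, hpn, hq0, by omega, hsum⟩
  · rintro ⟨p, hp, q, hq, hp0, hpn, hq0, hqp, hsum⟩
    exact ⟨p, ⟨hp, hp0, hpn⟩, q, ⟨hq, hq0, by omega⟩, hsum⟩

-- pyGetD at a nonnegative in-range index is getD at the Nat index
theorem pyGetD_toNat (c : List Int) (l : Int) (h0 : 0 ≤ l) (h1 : l < (c.length : Int)) :
    PySem.List.pyGetD c l 0 = c.getD l.toNat 0 := by
  rw [PySem.List.pyGetD_eq_getElem (xs := c) (i := l) (d := 0) h0 (by simpa using h1), List.getD_eq_getElem _ _ (by omega)]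

-- monotonicity of a ≤-sorted list on getD
theorem getD_mono {c : List Int} (hs : c.Pairwise (· ≤ ·)) {i j : Nat}
    (hij : i ≤ j) (hj : j < c.length) : c.getD i 0 ≤ c.getD j 0 := by
  rw [List.getD_eq_getElem _ _ (by omega), List.getD_eq_getElem _ _ hj]
  rcases Nat.lt_or_eq_of_le hij with h | h
  · exact List.pairwise_iff_getElem.mp hs i j (by omega) hj h
  · subst h; rfl

-- the two-pointer sweep finds a pair iff one exists in the index window
theorem twoPtr_iff (c : List Int) (hs : c.Pairwise (· ≤ ·)) (n : Int) (l r : Int)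
    (hl : 0 ≤ l) (hr : r < (c.length : Int)) :
    pvTwoPtr c n l r = true ↔
      ∃ i j : Nat, l ≤ (i : Int) ∧ i ≤ j ∧ (j : Int) ≤ r ∧ c.getD i 0 + c.getD j 0 = n := by
  fun_induction pvTwoPtr c n l r with
  | case1 l r hlr s heq =>
    constructor
    · intro _
      refine ⟨l.toNat, r.toNat, by omega, by omega, by omega, ?_⟩
      rw [← pyGetD_toNat c l hl (by omega), ← pyGetD_toNat c r (by omega) hr]; exact heq
    · intro _; rfl
  | case2 l r hlr s hne hlt ih =>
    rw [ih (by omega) hr]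
    constructor
    · rintro ⟨i, j, hi, hij, hj, hsum⟩; exact ⟨i, j, by omega, hij, hj, hsum⟩
    · rintro ⟨i, j, hi, hij, hj, hsum⟩
      refine ⟨i, j, ?_, hij, hj, hsum⟩
      -- l + 1 ≤ i: a pair starting at l would have sum ≤ c[l] + c[r] < n
      by_contra hcon
      have hil : (i : Int) = l := by omega
      have h1 : c.getD i 0 = PySem.List.pyGetD c l 0 := by
        rw [pyGetD_toNat c l hl (by omega)]; congr 1; omega
      have h2 : c.getD j 0 ≤ PySem.List.pyGetD c r 0 := by
        rw [pyGetD_toNat c r (by omega) hr]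
        exact getD_mono hs (by omega) (by omega)
      omega
  | case3 l r hlr s hne hge ih =>
    rw [ih hl (by omega)]
    constructor
    · rintro ⟨i, j, hi, hij, hj, hsum⟩; exact ⟨i, j, hi, hij, by omega, hsum⟩
    · rintro ⟨i, j, hi, hij, hj, hsum⟩
      refine ⟨i, j, hi, hij, ?_, hsum⟩
      -- j ≤ r - 1: a pair ending at r would have sum ≥ c[l] + c[r] > n
      by_contra hcon
      have hjr : (j : Int) = r := by omega
      have h1 : c.getD j 0 = PySem.List.pyGetD c r 0 := by
        rw [pyGetD_toNat c r (by omega) hr]; congr 1; omega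
      have h2 : PySem.List.pyGetD c l 0 ≤ c.getD i 0 := by
        rw [pyGetD_toNat c l hl (by omega)]
        exact getD_mono hs (by omega) (by omega)
      omega
  | case4 l r hlr =>
    simp only [Bool.false_eq_true, false_iff]
    rintro ⟨i, j, hi, hij, hj, _⟩; omega

-- B = true  iff  the same pair condition as A
theorem portB_iff (n : Int) (lst : List Int) :
    idan_check_goldbach_for_num_alt n lst = true ↔
      ∃ p ∈ lst, ∃ q ∈ lst, 0 ≤ p ∧ p < n ∧ 0 ≤ q ∧ q ≤ p ∧ p + q = n := by
  unfold idan_check_goldbach_for_num_alt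
  set c := PySem.List.sorted (PySem.Set.ofList (lst.filter (fun p => decide (0 ≤ p ∧ p < n)))) (fun x => x) false with hc
  have hlt : c.Pairwise (· < ·) := PySem.List.sorted_ofList_pairwise_lt _
  have hle : c.Pairwise (· ≤ ·) := hlt.imp (fun h => le_of_lt h)
  have hmem : ∀ x, x ∈ c ↔ (x ∈ lst ∧ 0 ≤ x ∧ x < n) := by
    intro x
    rw [hc, PySem.List.mem_sorted, PySem.Set.mem_ofList, List.mem_filter]
    simp
  have hmemD : ∀ i, i < c.length → c.getD i 0 ∈ c := by
    intro i h
    rw [List.getD_eq_getElem _ _ h]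
    exact List.getElem_mem h
  have hmono : ∀ i j, i < j → ∀ h : j < c.length, c.getD i 0 < c.getD j 0 := by
    intro i j hij h
    rw [List.getD_eq_getElem _ _ (by omega), List.getD_eq_getElem _ _ h]
    exact List.pairwise_iff_getElem.mp hlt i j (by omega) h hij
  rw [twoPtr_iff c hle n 0 ((c.length : Int) - 1) le_rfl (by omega)]
  constructor
  · rintro ⟨i, j, -, hij, hj, hsum⟩
    have hjlen : j < c.length := by omega
    have hq := (hmem _).mp (hmemD i (by omega))
    have hp := (hmem _).mp (hmemD j hjlen)
    have hle2 : c.getD i 0 ≤ c.getD j 0 := by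
      rcases Nat.lt_or_eq_of_le hij with h | h
      · exact le_of_lt (hmono i j h hjlen)
      · subst h; rfl
    exact ⟨c.getD j 0, hp.1, c.getD i 0, hq.1, hp.2.1, hp.2.2, hq.2.1, hle2, by omega⟩
  · rintro ⟨p, hp, q, hq, hp0, hpn, hq0, hqp, hsum⟩
    have hpc : p ∈ c := (hmem p).mpr ⟨hp, hp0, hpn⟩
    have hqc : q ∈ c := (hmem q).mpr ⟨hq, hq0, by omega⟩
    obtain ⟨j, hjlen, hcj⟩ := List.mem_iff_getElem.mp hpc
    obtain ⟨i, hilen, hci⟩ := List.mem_iff_getElem.mp hqc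
    have hgj : c.getD j 0 = p := by rw [List.getD_eq_getElem _ _ hjlen, hcj]
    have hgi : c.getD i 0 = q := by rw [List.getD_eq_getElem _ _ hilen, hci]
    have hij : i ≤ j := by
      by_contra hcon
      have := hmono j i (by omega) hilen
      omega
    exact ⟨i, j, by omega, hij, by omega, by omega⟩

-- ===== VERDICT (by name: the statement is the Claim_ definition above) =====
theorem idan_check_goldbach_for_num_spec : Claim_equal_idan_check_goldbach_for_num := by
  intro n lst _
  unfold Spec_idan_check_goldbach_for_num
  rw [Bool.eq_iff_iff, portA_iff, portB_iff]
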